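-- pv_equiv track=rewrite | github.com/saicharanyadavalli/interview-prep | crawler.py | extract_statement_text
-- ===== SOURCE A (Python) =====
-- def clean_multiline(value: str) -> str:
--     lines = [line.strip() for line in (value or "").splitlines()]
--     return "\n".join([line for line in lines if line])
--
-- def extract_statement_text(full_text: str) -> str:
--     if not full_text:
--         return ""
--     markers = ["Examples:", "Example:", "Constraints:"]
--     cut_positions = [full_text.find(marker) for marker in markers if full_text.find(marker) != -1]
--     if not cut_positions:
--         return clean_multiline(full_text)
--     return clean_multiline(full_text[: min(cut_positions)])
-- ===== SOURCE B (Python) =====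
-- def extract_statement_text(full_text: str) -> str:
--     markers = ("Examples:", "Example:", "Constraints:")
--     head = []
--     for i, ch in enumerate(full_text):
--         if any(full_text.startswith(m, i) for m in markers):
--             break
--         head.append(ch)
--     out = []
--     for line in "".join(head).splitlines():
--         line = line.strip()
--         if line:
--             out.append(line)
--     return "\n".join(out)
-- ===== Notes on version B (the rewrite author's own statement) =====
-- stated objective: alternative
-- what changed: Replaces three separate full-text find scans plus min with a single left-to-right scan that stops at the first position where any marker starts, and inlines the line cleaning into one accumulator loop instead of two comprehensions.
import Mathlib
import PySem

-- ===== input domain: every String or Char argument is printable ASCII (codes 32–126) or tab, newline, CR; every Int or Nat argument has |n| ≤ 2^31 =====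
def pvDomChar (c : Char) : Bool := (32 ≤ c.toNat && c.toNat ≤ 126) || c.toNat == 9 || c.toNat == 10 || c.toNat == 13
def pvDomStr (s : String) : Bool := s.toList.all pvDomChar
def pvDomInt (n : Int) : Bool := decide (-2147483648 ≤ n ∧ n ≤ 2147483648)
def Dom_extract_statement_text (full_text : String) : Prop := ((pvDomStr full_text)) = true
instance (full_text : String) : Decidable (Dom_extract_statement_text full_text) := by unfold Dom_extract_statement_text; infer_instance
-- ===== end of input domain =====

-- B replaces three full-text find scans + min with one left-to-right scan stopping at the
-- first marker start, and inlines the line cleaning into a single accumulator loop (alternative, not claimed faster).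

-- ===== PORT A =====
def clean_multiline (value : String) : String :=
  let v := if value = "" then "" else value           -- (value or "")
  let lines := (PySem.Str.splitlines v).map (fun l => PySem.Str.strip l)
  PySem.Str.join "\n" (lines.filter (fun l => l ≠ ""))

def pvMarkersS : List String := ["Examples:", "Example:", "Constraints:"]

-- [full_text.find(m) for m in markers if full_text.find(m) != -1]
def pvCutPositions (full_text : String) : List Int :=
  (pvMarkersS.filter (fun m => PySem.Str.find full_text m ≠ -1)).map
    (fun m => PySem.Str.find full_text m)

def extract_statement_text (full_text : String) : String :=
  if full_text = "" then ""
  else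
    match PySem.List.min? (pvCutPositions full_text) (fun x => x) with
    | none => clean_multiline full_text
    | some m => clean_multiline (PySem.Str.slice full_text none (some m))

-- ===== PORT B =====
def pvMarkers : List (List Char) :=
  ["Examples:".toList, "Example:".toList, "Constraints:".toList]

-- the single scan: keep characters until some marker starts at the current position, then stop (break)
def pvHead : List Char → List Char
  | [] => []
  | c :: t =>
      if pvMarkers.any (fun m => PySem.Chars.startswith (c :: t) m) then []
      else c :: pvHead t

def extract_statement_text_alt (full_text : String) : String :=
  let head := pvHead full_text.toList
  let out := (PySem.Chars.splitlines head).foldl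
    (fun acc l =>
      let l' := PySem.Chars.strip l
      if l' = [] then acc else acc ++ [l']) []
  String.ofList (PySem.Chars.join ['\n'] out)

-- ===== PRECONDITION & SPEC =====
def Spec_extract_statement_text (full_text : String) (out : String) : Prop := out = extract_statement_text_alt full_text
instance (full_text : String) (out : String) : Decidable (Spec_extract_statement_text full_text out) := by unfold Spec_extract_statement_text; infer_instance

-- ===== CLAIM (what is proved, stated in full; the proofs are below) =====
def Claim_equal_extract_statement_text : Prop := ∀ (full_text : String), Dom_extract_statement_text full_text → Spec_extract_statement_text full_text (extract_statement_text full_text)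

-- ===== LEMMAS AND PROOFS =====

-- "some marker starts at position i of cs"
def pvHit (cs : List Char) (i : Nat) : Prop := ∃ m ∈ pvMarkers, m <+: cs.drop i

lemma pvAny_iff (cs : List Char) :
    pvMarkers.any (fun m => PySem.Chars.startswith cs m) = true ↔ pvHit cs 0 := by
  simp [pvHit, List.any_eq_true, PySem.Chars.startswith_iff]

lemma pvHit_shift (c : Char) (t : List Char) (i : Nat) :
    pvHit (c :: t) (i + 1) ↔ pvHit t i := by
  simp [pvHit]

lemma pvHead_eq_self (cs : List Char) (h : ∀ i, ¬ pvHit cs i) : pvHead cs = cs := by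
  induction cs with
  | nil => rfl
  | cons c t ih =>
      rw [pvHead]
      have h0 : ¬ pvMarkers.any (fun m => PySem.Chars.startswith (c :: t) m) = true := by
        rw [pvAny_iff]; exact h 0
      simp only [h0]
      rw [ih (fun i hi => (h (i+1)) ((pvHit_shift c t i).2 hi))]
      simp

lemma pvHead_eq_take (cs : List Char) (j : Nat) (hmin : ∀ i < j, ¬ pvHit cs i)
    (hj : pvHit cs j) : pvHead cs = cs.take j := by
  induction cs generalizing j with
  | nil => rw [pvHead]; simp
  | cons c t ih =>
      cases j with
      | zero =>
          rw [pvHead]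
          have h0 : pvMarkers.any (fun m => PySem.Chars.startswith (c :: t) m) = true :=
            (pvAny_iff _).2 hj
          simp [h0]
      | succ j =>
          rw [pvHead]
          have h0 : ¬ pvMarkers.any (fun m => PySem.Chars.startswith (c :: t) m) = true := by
            rw [pvAny_iff]; exact hmin 0 (Nat.succ_pos j)
          simp only [h0, List.take_succ_cons]
          rw [ih j (fun i hi => fun hh => hmin (i+1) (by omega) ((pvHit_shift c t i).2 hh))
              ((pvHit_shift c t j).1 hj)]
          simp

-- membership correspondence of the two marker lists
lemma pvMarkers_mem (m : List Char) :
    m ∈ pvMarkers ↔ ∃ mS ∈ pvMarkersS, mS.toList = m := by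
  simp [pvMarkers, pvMarkersS]
  constructor
  · rintro (h | h | h) <;> [exact Or.inl h.symm; exact Or.inr (Or.inl h.symm); exact Or.inr (Or.inr h.symm)]
  · rintro (h | h | h) <;> [exact Or.inl h.symm; exact Or.inr (Or.inl h.symm); exact Or.inr (Or.inr h.symm)]

-- A's chosen prefix equals B's scan result
lemma pvHead_match (s : String) :
    pvHead s.toList =
      (match PySem.List.min? (pvCutPositions s) (fun x => x) with
        | none => s.toList
        | some m => PySem.Chars.slice s.toList none (some m)) := by
  cases hmin : PySem.List.min? (pvCutPositions s) (fun x => x) with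
  | none =>
      have hnil : pvCutPositions s = [] := (PySem.List.min?_eq_none_iff _ _).1 hmin
      have hfil : ∀ mS ∈ pvMarkersS, PySem.Str.find s mS = -1 := by
        intro mS hm
        by_contra hne
        have hmem : PySem.Str.find s mS ∈ pvCutPositions s := by
          simp only [pvCutPositions, List.mem_map]
          exact ⟨mS, List.mem_filter.2 ⟨hm, by simpa using hne⟩, rfl⟩
        rw [hnil] at hmem
        simp at hmem
      apply pvHead_eq_self
      intro i hhit
      obtain ⟨m, hm, hpre⟩ := hhit
      obtain ⟨mS, hmS, rfl⟩ := (pvMarkers_mem m).1 hm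
      have hinf : mS.toList <:+: s.toList :=
        List.infix_iff_prefix_suffix.2 ⟨_, hpre, List.drop_suffix _ _⟩
      have := hfil mS hmS
      rw [PySem.Str.find_eq_neg_one_iff] at this
      exact this hinf
  | some m =>
      have hmem : m ∈ pvCutPositions s := PySem.List.min?_mem hmin
      obtain ⟨mS, hmf, hfe⟩ : ∃ mS, mS ∈ pvMarkersS.filter (fun m => PySem.Str.find s m ≠ -1)
          ∧ PySem.Str.find s mS = m := by
        unfold pvCutPositions at hmem
        obtain ⟨mS, hmf, hfe⟩ := List.mem_map.1 hmem
        exact ⟨mS, hmf, hfe⟩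
      have hmS : mS ∈ pvMarkersS := (List.mem_filter.1 hmf).1
      have hne : PySem.Str.find s mS ≠ -1 := by
        have := (List.mem_filter.1 hmf).2; simpa using this
      have hm0 : 0 ≤ m := by
        rw [← hfe]
        rw [PySem.Str.find_nonneg_iff]
        rw [← PySem.Chars.find_ne_neg_one_iff]
        simpa [PySem.Str.find_eq] using hne
      have hfindC : PySem.Chars.find s.toList mS.toList = m := by
        simpa [PySem.Str.find_eq] using hfe
      have hspec := PySem.Chars.find_spec (s := s.toList) (sub := mS.toList)
        (by rw [hfindC]; exact hm0)
      rw [hfindC] at hspec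
      have hj : pvHit s.toList m.toNat := by
        refine ⟨mS.toList, (pvMarkers_mem _).2 ⟨mS, hmS, rfl⟩, hspec.1⟩
      have hminlt : ∀ i < m.toNat, ¬ pvHit s.toList i := by
        intro i hi hhit
        obtain ⟨m', hm', hpre⟩ := hhit
        obtain ⟨m'S, hm'S, rfl⟩ := (pvMarkers_mem m').1 hm'
        have hne' : PySem.Str.find s m'S ≠ -1 := by
          rw [Ne, PySem.Str.find_eq_neg_one_iff, not_not]
          exact List.infix_iff_prefix_suffix.2 ⟨_, hpre, List.drop_suffix _ _⟩
        have hmemF : PySem.Str.find s m'S ∈ pvCutPositions s := by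
          simp only [pvCutPositions, List.mem_map]
          exact ⟨m'S, List.mem_filter.2 ⟨hm'S, by simpa using hne'⟩, rfl⟩
        have hle : m ≤ PySem.Str.find s m'S := PySem.List.min?_isMin hmin _ hmemF
        have h0' : 0 ≤ PySem.Str.find s m'S := le_trans hm0 hle
        have hspec' := PySem.Chars.find_spec (s := s.toList) (sub := m'S.toList)
          (by simpa [PySem.Str.find_eq] using h0')
        refine hspec'.2 i ?_ ?_
        · have : m.toNat ≤ (PySem.Str.find s m'S).toNat := Int.toNat_le_toNat hle
          simp only [PySem.Str.find_eq] at this ⊢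
          omega
        · exact hpre
      rw [pvHead_eq_take s.toList m.toNat hminlt hj]
      show List.take m.toNat s.toList = PySem.Chars.slice s.toList none (some m)
      rw [PySem.Chars.slice_eq_listSlice, PySem.List.slice_to s.toList hm0]

lemma pvFoldl_clean (lines : List (List Char)) (acc : List (List Char)) :
    lines.foldl (fun acc l => let l' := PySem.Chars.strip l;
      if l' = [] then acc else acc ++ [l']) acc
    = acc ++ (lines.map PySem.Chars.strip).filter (fun l => l ≠ []) := by
  induction lines generalizing acc with
  | nil => simp
  | cons l t ih =>
      simp only [List.foldl, List.map, List.filter]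
      by_cases h : PySem.Chars.strip l = []
      · simp [h, ih]
      · simp [h, ih]

lemma pvMap_toList_filter (L : List String) :
    (L.filter (fun l => l ≠ "")).map String.toList
    = (L.map String.toList).filter (fun l => l ≠ []) := by
  rw [List.filter_map]
  congr 1
  apply List.filter_congr
  intro x _
  simp [String.toList_eq_nil_iff]

-- B's cleaning of a string s equals A's clean_multiline s
lemma pvClean_eq (s : String) :
    clean_multiline s
    = String.ofList (PySem.Chars.join ['\n']
        ((PySem.Chars.splitlines s.toList).foldl
          (fun acc l => let l' := PySem.Chars.strip l;
            if l' = [] then acc else acc ++ [l']) [])) := by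
  rw [pvFoldl_clean]
  unfold clean_multiline
  have hv : (if s = "" then "" else s) = s := by split <;> simp_all
  simp only [hv, List.nil_append]
  have key : (PySem.Str.join "\n"
        (((PySem.Str.splitlines s).map (fun l => PySem.Str.strip l)).filter
          (fun l => l ≠ ""))).toList
      = PySem.Chars.join ['\n']
        (((PySem.Chars.splitlines s.toList).map PySem.Chars.strip).filter (fun l => l ≠ [])) := by
    rw [PySem.Str.toList_join]
    have h1 : ("\n" : String).toList = ['\n'] := rfl
    rw [h1]
    congr 1
    rw [pvMap_toList_filter]
    congr 1
    rw [← PySem.Str.splitlines_map_toList, List.map_map, List.map_map]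
    simp [Function.comp_def, PySem.Str.toList_strip]
  rw [← key, String.ofList_toList]

-- ===== VERDICT (by name: the statement is the Claim_ definition above) =====
theorem extract_statement_text_spec : Claim_equal_extract_statement_text := by
  intro s _
  unfold Spec_extract_statement_text
  by_cases hs : s = ""
  · subst hs; rfl
  · unfold extract_statement_text extract_statement_text_alt
    simp only [hs, if_false]
    have hmatch := pvHead_match s
    cases hmin : PySem.List.min? (pvCutPositions s) (fun x => x) with
    | none =>
        rw [hmin] at hmatch
        have hmatch' : pvHead s.toList = s.toList := hmatch
        show clean_multiline s = _
        rw [pvClean_eq s, hmatch']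
    | some m =>
        rw [hmin] at hmatch
        have hmatch' : pvHead s.toList = PySem.Chars.slice s.toList none (some m) := hmatch
        show clean_multiline (PySem.Str.slice s none (some m)) = _
        rw [pvClean_eq (PySem.Str.slice s none (some m))]
        rw [PySem.Str.toList_slice, ← hmatch']
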